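-- pv_equiv track=rewrite | github.com/cfe-lab/CFEIntact | src/cfeintact/get_indel_impact.py | get_indel_impact
-- ===== SOURCE A (Python) =====
-- from typing import Iterable, TypeVar
--
-- T = TypeVar("T")
--
-- def get_indel_impact(reference: Iterable[T], query: Iterable[T]) -> float:
--     shift = 0
--     impacted = 0
--     counter = 0
--     good = 0
--
--     for (x, y) in zip(reference, query):
--         if x == "-" and y != "-":
--             shift += 1
--         if x != "-" and y == "-":
--             shift -= 1
--         if shift % 3 != 0:
--             counter += 1
--             good = 0
--         else:
--             good += 1
--             if good > 5:
--                 impacted += counter if counter > 30 else 0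
--                 counter = 0
--
--     impacted += counter if counter > 30 else 0
--     return impacted
-- ===== SOURCE B (Python) =====
-- def get_indel_impact(reference, query):
--     # Pass 1: cumulative indel balance -> per-position "bad frame" flags.
--     shift = 0
--     bads = []
--     for x, y in zip(reference, query):
--         if x == "-" and y != "-":
--             shift += 1
--         if x != "-" and y == "-":
--             shift -= 1
--         bads.append(shift % 3 != 0)
--     # Pass 2: scan maximal runs of equal flags.
--     impacted = 0
--     counter = 0
--     i = 0
--     n = len(bads)
--     while i < n:
--         j = i
--         while j < n and bads[j] == bads[i]:
--             j += 1
--         run = j - i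
--         if bads[i]:
--             counter += run
--         elif run >= 6:
--             if counter > 30:
--                 impacted += counter
--             counter = 0
--         i = j
--     if counter > 30:
--         impacted += counter
--     return impacted
-- ===== Notes on version B (the rewrite author's own statement) =====
-- stated objective: alternative
-- what changed: B splits the single stateful loop into two phases: one pass computing per-position bad-frame flags from the cumulative indel balance, then a run-length scan over those flags (a bad run adds its length to the counter, a good run of length >= 6 flushes the counter), replacing A's per-position good/counter state machine.
import Mathlib
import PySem

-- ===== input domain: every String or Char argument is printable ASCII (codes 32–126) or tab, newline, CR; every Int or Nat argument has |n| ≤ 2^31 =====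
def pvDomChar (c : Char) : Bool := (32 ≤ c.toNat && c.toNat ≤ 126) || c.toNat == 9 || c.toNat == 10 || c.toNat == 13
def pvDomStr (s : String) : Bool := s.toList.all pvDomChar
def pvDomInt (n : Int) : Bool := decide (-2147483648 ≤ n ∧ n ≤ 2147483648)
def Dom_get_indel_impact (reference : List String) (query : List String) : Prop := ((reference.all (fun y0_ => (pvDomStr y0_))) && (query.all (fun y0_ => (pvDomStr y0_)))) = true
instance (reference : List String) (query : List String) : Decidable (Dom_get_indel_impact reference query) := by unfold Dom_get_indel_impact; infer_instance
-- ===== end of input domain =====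

-- B splits A's single stateful loop into a flag-computing pass plus a run-length scan over the flags; alternative decomposition, same cost.

-- ===== PORT A =====
-- state = (shift, impacted, counter, good), exactly A's four loop variables
def pvStepA (st : Int × Int × Int × Int) (p : String × String) : Int × Int × Int × Int :=
  let shift := st.1
  let impacted := st.2.1
  let counter := st.2.2.1
  let good := st.2.2.2
  let shift := if p.1 = "-" ∧ p.2 ≠ "-" then shift + 1 else shift
  let shift := if p.1 ≠ "-" ∧ p.2 = "-" then shift - 1 else shift
  if PySem.Int.mod shift 3 ≠ 0 then
    (shift, impacted, counter + 1, 0)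
  else
    let good := good + 1
    if good > 5 then (shift, impacted + (if counter > 30 then counter else 0), 0, good)
    else (shift, impacted, counter, good)

def get_indel_impact (reference : List String) (query : List String) : Int :=
  let fin := (List.zip reference query).foldl pvStepA (0, 0, 0, 0)
  fin.2.1 + (if fin.2.2.1 > 30 then fin.2.2.1 else 0)

-- ===== PORT B =====
-- pass 1 of B: cumulative indel balance -> per-position bad-frame flags
def pvBads : Int → List (String × String) → List Bool
  | _, [] => []
  | shift, p :: rest =>
    let shift := if p.1 = "-" ∧ p.2 ≠ "-" then shift + 1 else shift
    let shift := if p.1 ≠ "-" ∧ p.2 = "-" then shift - 1 else shift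
    decide (PySem.Int.mod shift 3 ≠ 0) :: pvBads shift rest

-- pass 2 of B: maximal runs of equal flags, as (flag, run length) pairs (B's inner j-scan)
def pvRuns : List Bool → List (Bool × Nat)
  | [] => []
  | b :: rest =>
    (b, (rest.takeWhile (· == b)).length + 1) :: pvRuns (rest.dropWhile (· == b))
termination_by l => l.length
decreasing_by simpa using Nat.lt_succ_of_le (List.length_dropWhile_le (· == b) rest)

-- one run of B's scan acting on (impacted, counter)
def pvRunStep (st : Int × Int) (r : Bool × Nat) : Int × Int :=
  if r.1 then (st.1, st.2 + (r.2 : Int))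
  else if r.2 ≥ 6 then ((if st.2 > 30 then st.1 + st.2 else st.1), 0)
  else st

def get_indel_impact_alt (reference : List String) (query : List String) : Int :=
  let bads := pvBads 0 (List.zip reference query)
  let fin := (pvRuns bads).foldl pvRunStep (0, 0)
  if fin.2 > 30 then fin.1 + fin.2 else fin.1

-- ===== PRECONDITION & SPEC =====
def Spec_get_indel_impact (reference : List String) (query : List String) (out : Int) : Prop := out = get_indel_impact_alt reference query
instance (reference : List String) (query : List String) (out : Int) : Decidable (Spec_get_indel_impact reference query out) := by unfold Spec_get_indel_impact; infer_instance

-- ===== CLAIM (what is proved, stated in full; the proofs are below) =====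
def Claim_equal_get_indel_impact : Prop := ∀ (reference : List String) (query : List String), Dom_get_indel_impact reference query → Spec_get_indel_impact reference query (get_indel_impact reference query)

-- ===== LEMMAS AND PROOFS =====

-- A's loop, with the shift component projected away: a step on (impacted, counter, good) driven by the bad flag
def pvStepA3 (st : Int × Int × Int) (bad : Bool) : Int × Int × Int :=
  if bad then (st.1, st.2.1 + 1, 0)
  else
    let good := st.2.2 + 1
    if good > 5 then (st.1 + (if st.2.1 > 30 then st.2.1 else 0), 0, good)
    else (st.1, st.2.1, good)

-- each step of A = the shift update paired with the flag-driven step pvStepA3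
theorem pvStepA_eq (st : Int × Int × Int × Int) (p : String × String) :
    pvStepA st p =
      (let s := if p.1 ≠ "-" ∧ p.2 = "-" then
          (if p.1 = "-" ∧ p.2 ≠ "-" then st.1 + 1 else st.1) - 1
        else (if p.1 = "-" ∧ p.2 ≠ "-" then st.1 + 1 else st.1)
       (s, pvStepA3 st.2 (decide (PySem.Int.mod s 3 ≠ 0)))) := by
  simp only [pvStepA, pvStepA3]
  by_cases hb : PySem.Int.mod (if p.1 ≠ "-" ∧ p.2 = "-" then
      (if p.1 = "-" ∧ p.2 ≠ "-" then st.1 + 1 else st.1) - 1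
    else (if p.1 = "-" ∧ p.2 ≠ "-" then st.1 + 1 else st.1)) 3 ≠ 0
  · rw [if_pos hb, decide_eq_true hb, if_pos rfl]
  · rw [if_neg hb, decide_eq_false hb]
    simp only [Bool.false_eq_true, if_false]
    by_cases hg : st.2.2.2 + 1 > 5 <;> simp [hg]

-- bridge: A's fold, shift dropped, equals the flag-driven fold over pvBads
theorem pvBridge (l : List (String × String)) : ∀ (s imp c g : Int),
    (l.foldl pvStepA (s, imp, c, g)).2 = (pvBads s l).foldl pvStepA3 (imp, c, g) := by
  induction l with
  | nil => intro s imp c g; rfl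
  | cons p rest ih =>
    intro s imp c g
    rw [List.foldl_cons, pvStepA_eq, pvBads, List.foldl_cons]
    exact ih _ _ _ _

theorem pvBadRun (n : Nat) : ∀ (imp c : Int),
    (List.replicate n true).foldl pvStepA3 (imp, c, 0) = (imp, c + n, 0) := by
  induction n with
  | zero => intro imp c; simp
  | succ m ih =>
    intro imp c
    have hstep : pvStepA3 (imp, c, 0) true = (imp, c + 1, 0) := by simp [pvStepA3]
    rw [List.replicate_succ, List.foldl_cons, hstep, ih]
    simp; omega

theorem pvGoodRun (n : Nat) : ∀ (imp c g : Int),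
    (List.replicate n false).foldl pvStepA3 (imp, c, g) =
      (if n = 0 ∨ g + n ≤ 5 then (imp, c, g + n)
       else (imp + (if c > 30 then c else 0), 0, g + n)) := by
  induction n with
  | zero => intro imp c g; simp
  | succ m ih =>
    intro imp c g
    simp only [List.replicate_succ, List.foldl_cons, pvStepA3, Bool.false_eq_true, if_false]
    by_cases h1 : g + 1 > 5
    · rw [if_pos h1, ih]
      by_cases hC : m = 0 ∨ g + 1 + (m : Int) ≤ 5
      · have hm : m = 0 := by
          rcases hC with h | h
          · exact h
          · omega
        subst hm
        rw [if_pos hC, if_neg (show ¬((0 + 1 : Nat) = 0 ∨ g + ((0 + 1 : Nat) : Int) ≤ 5) from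
          fun h => h.elim (fun h0 => by simp at h0) (fun hh => by push_cast at hh; omega))]
        simp
      · rw [if_neg hC, if_neg (show ¬((m + 1 : Nat) = 0 ∨ g + ((m + 1 : Nat) : Int) ≤ 5) from
          fun h => h.elim (fun h0 => by simp at h0) (fun hh => by push_cast at hh; omega))]
        simp; omega
    · rw [if_neg h1, ih]
      by_cases h2 : g + 1 + (m : Int) ≤ 5
      · rw [if_pos (Or.inr h2),
          if_pos (show ((m + 1 : Nat) = 0 ∨ g + ((m + 1 : Nat) : Int) ≤ 5) from
            Or.inr (by push_cast; omega))]
        simp; omega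
      · rw [if_neg (show ¬(m = 0 ∨ g + 1 + (m : Int) ≤ 5) from fun h =>
            h.elim (fun h0 => h2 (by subst h0; push_cast; omega)) h2),
          if_neg (show ¬((m + 1 : Nat) = 0 ∨ g + ((m + 1 : Nat) : Int) ≤ 5) from
            fun h => h.elim (fun h0 => by simp at h0) (fun hh => by push_cast at hh; omega))]
        simp; omega

-- key: the flag-driven fold, projected to (impacted, counter), equals B's run scan;
-- the good counter g is only constrained when the list starts with a good frame
theorem pvKey (l : List Bool) : ∀ (imp c g : Int), (l.head? = some false → g = 0) →
    (((l.foldl pvStepA3 (imp, c, g)).1, (l.foldl pvStepA3 (imp, c, g)).2.1)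
      = (pvRuns l).foldl pvRunStep (imp, c)) := by
  induction l using pvRuns.induct with
  | case1 => intro imp c g _; simp [pvRuns]
  | case2 b rest ih =>
    intro imp c g hg
    have hpre : rest.takeWhile (· == b) = List.replicate (rest.takeWhile (· == b)).length b := by
      apply List.eq_replicate_of_mem
      intro x hx
      simpa using List.mem_takeWhile_imp hx
    have hrest : rest = rest.takeWhile (· == b) ++ rest.dropWhile (· == b) :=
      (List.takeWhile_append_dropWhile).symm
    have hhead : ∀ h, (rest.dropWhile (· == b)).head? = some h → ¬ (h == b) = true := by
      intro h hh
      have := List.head?_dropWhile_not (· == b) rest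
      rw [hh] at this
      simpa using this
    simp only [pvRuns, List.foldl_cons]
    conv_lhs => rw [hrest, List.foldl_append, hpre]
    cases b with
    | true =>
      have hstep : pvStepA3 (imp, c, g) true = (imp, c + 1, 0) := by simp [pvStepA3]
      rw [hstep, pvBadRun]
      rw [show (pvRunStep (imp, c) (true, (rest.takeWhile (· == true)).length + 1))
            = (imp, c + 1 + ((rest.takeWhile (· == true)).length : Int)) by
          simp [pvRunStep]; ring]
      exact ih imp (c + 1 + ((rest.takeWhile (· == true)).length : Int)) 0 (fun _ => rfl)
    | false =>
      have hg0 : g = 0 := hg rfl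
      subst hg0
      have hstep : pvStepA3 (imp, c, 0) false = (imp, c, 1) := by simp [pvStepA3]
      rw [hstep, pvGoodRun]
      set k := (rest.takeWhile (· == false)).length with hk
      have hcond : (rest.dropWhile (· == false)).head? = some false → False := by
        intro hh; exact hhead false hh rfl
      by_cases h5 : (1 : Int) + (k : Int) ≤ 5
      · rw [if_pos (Or.inr h5)]
        rw [show (pvRunStep (imp, c) (false, k + 1)) = (imp, c) by
          simp only [pvRunStep]; rw [if_neg (by simp), if_neg (by omega)]]
        exact ih imp c (1 + (k : Int)) (fun hh => absurd hh hcond)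
      · rw [if_neg (show ¬(k = 0 ∨ (1 : Int) + (k : Int) ≤ 5) by
          rintro (h | h)
          · exact h5 (by rw [h]; norm_num)
          · exact h5 h)]
        rw [show (pvRunStep (imp, c) (false, k + 1))
              = (imp + (if c > 30 then c else 0), 0) by
          simp only [pvRunStep]
          rw [if_neg (by simp), if_pos (by omega)]
          by_cases hc : c > 30 <;> simp [hc]]
        exact ih (imp + (if c > 30 then c else 0)) 0 (1 + (k : Int))
          (fun hh => absurd hh hcond)

-- ===== VERDICT (by name: the statement is the Claim_ definition above) =====
theorem get_indel_impact_spec : Claim_equal_get_indel_impact := by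
  intro reference query _
  unfold Spec_get_indel_impact get_indel_impact get_indel_impact_alt
  have hb := pvBridge (List.zip reference query) 0 0 0 0
  have hk := pvKey (pvBads 0 (List.zip reference query)) 0 0 0 (fun _ => rfl)
  set X := ((List.zip reference query).foldl pvStepA (0, 0, 0, 0)) with hX
  set R := ((pvRuns (pvBads 0 (List.zip reference query))).foldl pvRunStep (0, 0)) with hR
  have h1 : X.2.1 = R.1 := by rw [hb] at *; rw [← hk]
  have h2 : X.2.2.1 = R.2 := by rw [hb] at *; rw [← hk]
  simp only [h1, h2]
  split <;> ring
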